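-- pv_equiv track=rewrite | github.com/cdimoush/agora | agora/chunker.py | _fix_code_blocks
-- ===== SOURCE A (Python) =====
-- def _fix_code_blocks(chunks: list[str]) -> list[str]:
--     """Ensure code blocks are properly opened/closed across chunks."""
--     fixed: list[str] = []
--     in_code_block = False
--
--     for chunk in chunks:
--         if in_code_block:
--             chunk = "```\n" + chunk
--
--         # Count triple-backtick fences in this chunk
--         fence_count = chunk.count("```")
--         # If odd number of fences, the chunk ends inside a code block
--         if fence_count % 2 == 1:
--             in_code_block = not in_code_block
--
--         if in_code_block:
--             chunk = chunk + "\n```"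
--
--         fixed.append(chunk)
--
--     return fixed
-- ===== SOURCE B (Python) =====
-- def _fix_code_blocks(chunks: list[str]) -> list[str]:
--     """Stateless rewrite: the fence parity of the previous original chunk
--     decides the prepend, the chunk's own parity decides the append."""
--     return [
--         ("```\n" if prev.count("```") % 2 == 1 else "")
--         + chunk
--         + ("\n```" if chunk.count("```") % 2 == 1 else "")
--         for prev, chunk in zip([""] + chunks[:-1], chunks)
--     ]
-- ===== Notes on version B (the rewrite author's own statement) =====
-- stated objective: simpler
-- what changed: Replaced the sequential in_code_block toggle with a stateless zip-comprehension: the prepend is decided by the previous original chunk's fence parity and the append by the chunk's own parity, since the prepended fence makes the running state collapse to the previous chunk's count parity.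
import Mathlib
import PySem

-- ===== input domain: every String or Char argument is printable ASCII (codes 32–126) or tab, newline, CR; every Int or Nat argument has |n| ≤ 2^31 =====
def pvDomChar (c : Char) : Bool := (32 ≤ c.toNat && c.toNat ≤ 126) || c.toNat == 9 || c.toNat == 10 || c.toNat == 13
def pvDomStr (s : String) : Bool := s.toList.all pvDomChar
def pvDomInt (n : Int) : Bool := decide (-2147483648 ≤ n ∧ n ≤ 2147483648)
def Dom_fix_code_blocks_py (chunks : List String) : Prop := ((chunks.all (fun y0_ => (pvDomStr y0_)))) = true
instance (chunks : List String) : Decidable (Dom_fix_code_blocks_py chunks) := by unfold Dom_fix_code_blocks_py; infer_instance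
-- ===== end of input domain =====

-- B replaces A's sequential in_code_block toggle by a stateless zip over (previous chunk, chunk),
-- using that the running state always equals the previous chunk's fence-count parity (objective: simpler).
-- String concatenation is ported on List Char (toList / String.ofList), where PySem.Str.count is defined; exact.

-- ===== PORT A =====
def pvBT : List Char := ['`', '`', '`']
def pvFence : List Char := ['`', '`', '`', '\n']
def pvNlFence : List Char := ['\n', '`', '`', '`']

-- loop body of A, step for step: prepend if in_code_block, count fences, toggle on odd, append if in_code_block
def pvStepA (st : List String × Bool) (chunk : String) : List String × Bool :=
  let c := if st.2 then pvFence ++ chunk.toList else chunk.toList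
  let fence_count := PySem.Chars.count c pvBT
  let in_code_block := if fence_count % 2 == 1 then !st.2 else st.2
  let c2 := if in_code_block then c ++ pvNlFence else c
  (st.1 ++ [String.ofList c2], in_code_block)

def fix_code_blocks_py (chunks : List String) : List String :=
  (chunks.foldl pvStepA (([] : List String), false)).1

-- ===== PORT B =====
-- prev.count("```") % 2 == 1
def pvOdd (s : String) : Bool := PySem.Chars.count s.toList pvBT % 2 == 1

def fix_code_blocks_py_alt (chunks : List String) : List String :=
  (("" :: PySem.List.slice chunks none (some (-1))).zip chunks).map
    (fun pc =>
      String.ofList ((if pvOdd pc.1 then pvFence else []) ++ pc.2.toList ++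
                 (if pvOdd pc.2 then pvNlFence else [])))

-- ===== PRECONDITION & SPEC =====
def Spec_fix_code_blocks_py (chunks : List String) (out : List String) : Prop := out = fix_code_blocks_py_alt chunks
instance (chunks : List String) (out : List String) : Decidable (Spec_fix_code_blocks_py chunks out) := by unfold Spec_fix_code_blocks_py; infer_instance

-- ===== CLAIM (what is proved, stated in full; the proofs are below) =====
def Claim_equal_fix_code_blocks_py : Prop := ∀ (chunks : List String), Dom_fix_code_blocks_py chunks → Spec_fix_code_blocks_py chunks (fix_code_blocks_py chunks)

-- ===== LEMMAS AND PROOFS =====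

-- the output list A produces from incoming state b, characterised chunk-locally
def pvBmap : Bool → List String → List String
  | _, [] => []
  | b, c :: t =>
      String.ofList ((if b then pvFence else []) ++ c.toList ++ (if pvOdd c then pvNlFence else []))
        :: pvBmap (pvOdd c) t

theorem pv_go_acc (fuel : Nat) : ∀ (l : List Char) (acc : Nat),
    PySem.Chars.count.go pvBT fuel l acc = PySem.Chars.count.go pvBT fuel l 0 + acc := by
  induction fuel with
  | zero => intro l acc; simp [PySem.Chars.count.go]
  | succ f ih =>
      intro l acc
      cases l with
      | nil => simp [PySem.Chars.count.go]
      | cons h t =>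
          rw [PySem.Chars.count.go, PySem.Chars.count.go]
          split_ifs with hp
          · rw [ih _ (acc + 1), ih _ (0 + 1)]; omega
          · exact ih t acc

theorem pv_go_fuel (f1 : Nat) : ∀ (f2 : Nat) (l : List Char) (acc : Nat),
    l.length ≤ f1 → l.length ≤ f2 →
    PySem.Chars.count.go pvBT f1 l acc = PySem.Chars.count.go pvBT f2 l acc := by
  induction f1 with
  | zero =>
      intro f2 l acc h1 _
      have : l = [] := List.eq_nil_of_length_eq_zero (Nat.le_zero.mp h1)
      subst this
      cases f2 <;> simp [PySem.Chars.count.go]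
  | succ f ih =>
      intro f2 l acc h1 h2
      cases l with
      | nil => cases f2 <;> simp [PySem.Chars.count.go]
      | cons h t =>
          cases f2 with
          | zero => simp at h2
          | succ f2' =>
              rw [PySem.Chars.count.go, PySem.Chars.count.go]
              simp only [List.length_cons] at h1 h2
              split_ifs with hp
              · apply ih <;> · simp [pvBT]; omega
              · exact ih f2' t acc (by omega) (by omega)

theorem pv_go_step (n : Nat) (hd : Char) (t : List Char) (acc : Nat) :
    PySem.Chars.count.go pvBT (n + 1) (hd :: t) acc =
      if pvBT.isPrefixOf (hd :: t) = true then
        PySem.Chars.count.go pvBT n (List.drop pvBT.length (hd :: t)) (acc + 1)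
      else PySem.Chars.count.go pvBT n t acc := rfl

theorem pv_count_fence (cs : List Char) :
    PySem.Chars.count (pvFence ++ cs) pvBT = PySem.Chars.count cs pvBT + 1 := by
  have hp1 : pvBT.isPrefixOf ('`' :: '`' :: '`' :: '\n' :: cs) = true := by
    simp [pvBT, List.isPrefixOf]
  have hp2 : ¬ (pvBT.isPrefixOf ('\n' :: cs) = true) := by
    simp [pvBT, List.isPrefixOf]
  show PySem.Chars.count.go pvBT (pvFence ++ cs).length (pvFence ++ cs) 0
      = PySem.Chars.count.go pvBT cs.length cs 0 + 1
  have hlen : (pvFence ++ cs).length = cs.length + 3 + 1 := by simp [pvFence]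
  rw [hlen, show pvFence ++ cs = '`' :: '`' :: '`' :: '\n' :: cs from rfl, pv_go_step, if_pos hp1]
  rw [show List.drop pvBT.length ('`' :: '`' :: '`' :: '\n' :: cs) = '\n' :: cs from rfl]
  rw [show cs.length + 3 = cs.length + 2 + 1 from rfl, pv_go_step, if_neg hp2]
  rw [pv_go_fuel (cs.length + 2) cs.length cs (0 + 1) (by omega) le_rfl, pv_go_acc]

theorem pv_stepA (st : List String × Bool) (c : String) :
    pvStepA st c =
      (st.1 ++ [String.ofList ((if st.2 then pvFence else []) ++ c.toList ++ (if pvOdd c then pvNlFence else []))],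
       pvOdd c) := by
  obtain ⟨acc, b⟩ := st
  cases b with
  | false =>
      by_cases h : PySem.Chars.count c.toList pvBT % 2 = 1
      · simp [pvStepA, pvOdd, h]
      · have h0 : PySem.Chars.count c.toList pvBT % 2 = 0 := by omega
        simp [pvStepA, pvOdd, h0]
  | true =>
      by_cases h : PySem.Chars.count c.toList pvBT % 2 = 1
      · have h2 : (PySem.Chars.count c.toList pvBT + 1) % 2 = 0 := by omega
        simp [pvStepA, pvOdd, pv_count_fence, h, h2, List.append_assoc]
      · have h0 : PySem.Chars.count c.toList pvBT % 2 = 0 := by omega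
        have h2 : (PySem.Chars.count c.toList pvBT + 1) % 2 = 1 := by omega
        simp [pvStepA, pvOdd, pv_count_fence, h0, h2]

theorem pv_foldA (l : List String) : ∀ (b : Bool) (acc : List String),
    (l.foldl pvStepA (acc, b)).1 = acc ++ pvBmap b l := by
  induction l with
  | nil => intro b acc; simp [pvBmap]
  | cons c t ih =>
      intro b acc
      rw [List.foldl_cons, pv_stepA]
      rw [ih]
      simp [pvBmap]

theorem pv_zipB (l : List String) : ∀ (p : String),
    ((p :: l.dropLast).zip l).map
      (fun pc =>
        String.ofList ((if pvOdd pc.1 then pvFence else []) ++ pc.2.toList ++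
                   (if pvOdd pc.2 then pvNlFence else []))) = pvBmap (pvOdd p) l := by
  induction l with
  | nil => intro p; simp [pvBmap]
  | cons c t ih =>
      intro p
      cases t with
      | nil => simp [pvBmap]
      | cons d t' =>
          rw [List.dropLast_cons₂, List.zip_cons_cons, List.map_cons, ih c]
          simp [pvBmap]

-- ===== VERDICT (by name: the statement is the Claim_ definition above) =====
theorem fix_code_blocks_py_spec : Claim_equal_fix_code_blocks_py := by
  intro chunks _
  unfold Spec_fix_code_blocks_py fix_code_blocks_py fix_code_blocks_py_alt
  rw [pv_foldA]
  rw [PySem.List.slice_to_neg_one, pv_zipB]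
  have : pvOdd "" = false := by decide
  simp [this]
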